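-- pv_equiv track=rewrite | github.com/Sl1mj1m14/BlackboardTestHacker | colleges/002835/BFOR203/ip.py | find_sub_ip
-- ===== SOURCE A (Python) =====
-- def find_sub_ip (bin_list, subnet, type):
--
--     host = "0"
--
--     #Host bit should be 0 for network ip
--     #Host bit should be 1 for broadcast ip
--     if type == "broadcast":
--         host = "1"
--
--     index = 0
--     return_ip_list = []
--
--     for byte in bin_list:
--         index += 1
--
--         if (index > int(subnet)):
--             return_ip_list.append(host)
--             continue
--
--         return_ip_list.append(byte)
--
--     return return_ip_list
-- ===== SOURCE B (Python) =====
-- def find_sub_ip(bin_list, subnet, type):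
--     host = "1" if type == "broadcast" else "0"
--     k = max(0, int(subnet))
--     return bin_list[:k] + [host] * (len(bin_list) - k)
-- ===== Notes on version B (the rewrite author's own statement) =====
-- stated objective: simpler
-- what changed: Replaces the per-element loop with index counter and comparison by a direct slice-plus-fill: keep the first max(0,subnet) bytes and append the host bit repeated for the remaining positions.
import Mathlib
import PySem

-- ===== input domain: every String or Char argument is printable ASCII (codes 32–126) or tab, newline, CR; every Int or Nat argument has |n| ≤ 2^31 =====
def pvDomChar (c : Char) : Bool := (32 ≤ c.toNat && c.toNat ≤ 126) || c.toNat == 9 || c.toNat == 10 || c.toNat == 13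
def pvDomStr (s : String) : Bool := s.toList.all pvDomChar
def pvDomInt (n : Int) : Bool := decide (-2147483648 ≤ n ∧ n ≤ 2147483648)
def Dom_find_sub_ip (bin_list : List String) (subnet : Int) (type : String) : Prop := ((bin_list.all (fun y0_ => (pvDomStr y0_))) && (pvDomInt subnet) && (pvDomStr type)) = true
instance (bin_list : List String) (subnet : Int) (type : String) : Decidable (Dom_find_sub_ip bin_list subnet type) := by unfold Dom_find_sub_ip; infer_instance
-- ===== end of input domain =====

-- B replaces the indexed loop by slice-plus-fill (simpler decomposition); return values proved equal.
-- ===== PORT A =====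
-- loop over bin_list carrying the 1-based index; append host past the subnet boundary, the byte otherwise
def find_sub_ip_go (host : String) (subnet : Int) (index : Int) : List String → List String
  | [] => []
  | byte :: rest =>
    if index + 1 > subnet then host :: find_sub_ip_go host subnet (index + 1) rest
    else byte :: find_sub_ip_go host subnet (index + 1) rest

def find_sub_ip (bin_list : List String) (subnet : Int) (type : String) : List String :=
  let host := if type == "broadcast" then "1" else "0"
  find_sub_ip_go host subnet 0 bin_list

-- ===== PORT B =====
def find_sub_ip_alt (bin_list : List String) (subnet : Int) (type : String) : List String :=
  let host := if type == "broadcast" then "1" else "0"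
  let k : Int := max 0 subnet
  bin_list.take k.toNat ++ List.replicate (bin_list.length - k.toNat) host

-- ===== PRECONDITION & SPEC =====
def Spec_find_sub_ip (bin_list : List String) (subnet : Int) (type : String) (out : List String) : Prop := out = find_sub_ip_alt bin_list subnet type
instance (bin_list : List String) (subnet : Int) (type : String) (out : List String) : Decidable (Spec_find_sub_ip bin_list subnet type out) := by unfold Spec_find_sub_ip; infer_instance

-- ===== CLAIM (what is proved, stated in full; the proofs are below) =====
def Claim_equal_find_sub_ip : Prop := ∀ (bin_list : List String) (subnet : Int) (type : String), Dom_find_sub_ip bin_list subnet type → Spec_find_sub_ip bin_list subnet type (find_sub_ip bin_list subnet type)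

-- ===== LEMMAS AND PROOFS =====

-- ===== VERDICT (by name: the statement is the Claim_ definition above) =====
-- characterisation of A's loop: the first (subnet - index) elements are kept, the rest become host bits
theorem find_sub_ip_go_eq (host : String) (subnet : Int) :
    ∀ (l : List String) (index : Int),
      find_sub_ip_go host subnet index l =
        l.take (subnet - index).toNat ++ List.replicate (l.length - (subnet - index).toNat) host := by
  intro l
  induction l with
  | nil => intro index; simp [find_sub_ip_go]
  | cons byte rest ih =>
    intro index
    by_cases h : index + 1 > subnet
    · have h0 : (subnet - index).toNat = 0 := by omega
      have h1 : (subnet - (index + 1)).toNat = 0 := by omega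
      simp [find_sub_ip_go, h, ih, h0, h1, List.replicate_succ]
    · have h0 : (subnet - index).toNat = (subnet - (index + 1)).toNat + 1 := by omega
      simp [find_sub_ip_go, h, ih, h0, List.take_succ_cons]

theorem find_sub_ip_spec : Claim_equal_find_sub_ip := by
  intro bin_list subnet type _
  unfold Spec_find_sub_ip find_sub_ip find_sub_ip_alt
  rw [find_sub_ip_go_eq]
  have : (subnet - 0).toNat = (max 0 subnet).toNat := by omega
  rw [this]
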